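-- pv_equiv track=rewrite | github.com/MarkC11235/cryptography | project.py | subset_sum_recursive
-- ===== SOURCE A (Python) =====
-- def subset_sum_recursive(M: list[int], S: int, index: int, T: list[int]) -> list[int]:
--     """
--     M is a list (length 100) of integers and S is the target sum.
--     Return the subset that sums the closest to S.
--     """
--     if index == len(M):
--         return T
--
--     # Include the current element in the subset
--     T[index] = 1
--     if sum_from_bin_list(T, M) <= S:
--         return subset_sum_recursive(M, S, index + 1, T)
--
--     # Exclude the current element from the subset
--     T[index] = 0
--     return subset_sum_recursive(M, S, index + 1, T)
--
-- def sum_from_bin_list(T: list[int], M: list[int]) -> int: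
--     """
--     Given a binary list T and a list M, return the sum of the elements in M
--     that are included in the subset indicated by T.
--     """
--     return sum(M[i] for i in range(len(M)) if T[i])
-- ===== SOURCE B (Python) =====
-- def subset_sum_recursive(M: list[int], S: int, index: int, T: list[int]) -> list[int]:
--     """
--     Iterative greedy selection with an incrementally maintained running sum:
--     one pass over the indices instead of recursion with a full re-summation
--     at every step. Mutates T in place and returns it, like the original.
--     """
--     n = len(M)
--     if index >= n:
--         return T
--     rs = sum(M[i] for i in range(n) if T[i])
--     for i in range(index, n):
--         if T[i]:
--             rs -= M[i]
--         if rs + M[i] <= S: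
--             rs += M[i]
--             T[i] = 1
--         else:
--             T[i] = 0
--     return T
-- ===== Notes on version B (the rewrite author's own statement) =====
-- stated objective: faster
-- what changed: Replaces the tail recursion with a single iterative loop that maintains the selected sum incrementally, eliminating the O(n) re-summation (sum_from_bin_list) done at every step.
-- outside the precondition, e.g. on subset_sum_recursive([5, 7], 7, -1, [0, 0, 0]): A returns [1, 0, 1], B returns [0, 0, 1]; on subset_sum_recursive([1], 5, 2, [0, 0, 0]): A raises IndexError, B returns [0, 0, 0]
import Mathlib
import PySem

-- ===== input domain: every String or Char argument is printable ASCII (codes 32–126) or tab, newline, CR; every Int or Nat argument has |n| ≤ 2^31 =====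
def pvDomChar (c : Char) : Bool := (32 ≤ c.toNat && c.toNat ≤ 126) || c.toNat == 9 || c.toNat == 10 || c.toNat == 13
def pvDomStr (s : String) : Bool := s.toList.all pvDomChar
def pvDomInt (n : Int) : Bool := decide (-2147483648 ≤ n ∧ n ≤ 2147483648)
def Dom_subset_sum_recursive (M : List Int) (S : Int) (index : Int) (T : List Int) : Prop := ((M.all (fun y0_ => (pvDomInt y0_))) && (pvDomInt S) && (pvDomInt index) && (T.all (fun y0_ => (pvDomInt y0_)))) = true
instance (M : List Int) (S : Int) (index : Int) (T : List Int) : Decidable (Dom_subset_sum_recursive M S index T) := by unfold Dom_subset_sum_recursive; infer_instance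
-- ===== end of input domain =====

-- B replaces A's recursion + full re-summation per step with one iterative loop
-- keeping an incremental running sum (O(n) instead of O(n^2)); mutation of T is a
-- Python side effect, the equivalence proved here is about the RETURN value
-- (both Pythons write the same values to the same list object).

-- ===== PORT A =====
-- sum(M[i] for i in range(len(M)) if T[i])
def sum_from_bin_list (T M : List Int) : Int :=
  (PySem.List.pyRange 0 (M.length : Int) 1).foldl
    (fun acc i => if PySem.List.pyGetD T i 0 ≠ 0 then acc + PySem.List.pyGetD M i 0 else acc) 0

def subset_sum_recursive (M : List Int) (S : Int) (index : Int) (T : List Int) : List Int :=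
  if index = (M.length : Int) then T
  else if _h : index < (M.length : Int) then
    -- T[index] = 1  (Pre_ keeps index in range, so the total pySetD is exact here)
    let T1 := PySem.List.pySetD T index 1
    if sum_from_bin_list T1 M ≤ S then subset_sum_recursive M S (index + 1) T1
    else subset_sum_recursive M S (index + 1) (PySem.List.pySetD T1 index 0)
  else T  -- totality guard only: Python raises IndexError here (outside Pre_)
termination_by ((M.length : Int) - index).toNat
decreasing_by all_goals omega

-- ===== PORT B =====
def altStep (M : List Int) (S : Int) (p : Int × List Int) (i : Int) : Int × List Int :=
  let rs := if PySem.List.pyGetD p.2 i 0 ≠ 0 then p.1 - PySem.List.pyGetD M i 0 else p.1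
  if rs + PySem.List.pyGetD M i 0 ≤ S then
    (rs + PySem.List.pyGetD M i 0, PySem.List.pySetD p.2 i 1)
  else (rs, PySem.List.pySetD p.2 i 0)

def subset_sum_recursive_alt (M : List Int) (S : Int) (index : Int) (T : List Int) : List Int :=
  if (M.length : Int) ≤ index then T
  else
  let rs :=
    (PySem.List.pyRange 0 (M.length : Int) 1).foldl
      (fun acc i => if PySem.List.pyGetD T i 0 ≠ 0 then acc + PySem.List.pyGetD M i 0 else acc) 0
  ((PySem.List.pyRange index (M.length : Int) 1).foldl (altStep M S) (rs, T)).2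

-- ===== PRECONDITION & SPEC =====
-- Pre_ keeps the natural domain: index must be len(M) (immediate return) or a
-- valid non-negative position with len(T) ≥ len(M). Excluded but returning in A:
-- negative index, where Python's negative-index wraparound is an implementation
-- artefact; excluded and raising in A: index > len(M) or len(T) < len(M) (IndexError).
def Pre_subset_sum_recursive (M : List Int) (S : Int) (index : Int) (T : List Int) : Prop :=
  index = (M.length : Int) ∨ (0 ≤ index ∧ index < (M.length : Int) ∧ M.length ≤ T.length)
instance (M : List Int) (S : Int) (index : Int) (T : List Int) : Decidable (Pre_subset_sum_recursive M S index T) := by unfold Pre_subset_sum_recursive; infer_instance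

def pvWitness_subset_sum_recursive : List Int × Int × Int × List Int := ([3, 1, 4], 5, 0, [0, 0, 0])

def Spec_subset_sum_recursive (M : List Int) (S : Int) (index : Int) (T : List Int) (out : List Int) : Prop := out = subset_sum_recursive_alt M S index T
instance (M : List Int) (S : Int) (index : Int) (T : List Int) (out : List Int) : Decidable (Spec_subset_sum_recursive M S index T out) := by unfold Spec_subset_sum_recursive; infer_instance

-- ===== CLAIM (what is proved, stated in full; the proofs are below) =====
def Claim_equal_subset_sum_recursive : Prop := ∀ (M : List Int) (S : Int) (index : Int) (T : List Int), Dom_subset_sum_recursive M S index T → Pre_subset_sum_recursive M S index T → Spec_subset_sum_recursive M S index T (subset_sum_recursive M S index T)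

-- ===== LEMMAS AND PROOFS =====

-- the filtered-sum loop as a sum of mapped terms
lemma sumBin_eq_sum (T M : List Int) :
    sum_from_bin_list T M
      = ((PySem.List.pyRange 0 (M.length : Int) 1).map
          (fun i => if PySem.List.pyGetD T i 0 ≠ 0 then PySem.List.pyGetD M i 0 else 0)).sum := by
  unfold sum_from_bin_list
  have h : (fun (acc i : Int) => if PySem.List.pyGetD T i 0 ≠ 0 then acc + PySem.List.pyGetD M i 0 else acc)
      = (fun (acc i : Int) => acc + if PySem.List.pyGetD T i 0 ≠ 0 then PySem.List.pyGetD M i 0 else 0) := by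
    funext acc i; split_ifs <;> simp
  rw [h, PySem.List.foldl_add]; simp

lemma pyGetD_set_of_lt (T : List Int) (j i v : Int) (h0 : 0 ≤ j) (hi : 0 ≤ i)
    (hj : j.toNat < T.length) :
    PySem.List.pyGetD (PySem.List.pySetD T j v) i 0
      = if i = j then v else PySem.List.pyGetD T i 0 := by
  have hj' : j = ((j.toNat : Nat) : Int) := by omega
  have hi' : i = ((i.toNat : Nat) : Int) := by omega
  rw [hj', hi', PySem.List.pyGetD_pySetD_natCast _ _ _ _ _ hj]
  by_cases h : i.toNat = j.toNat
  · rw [if_pos h, if_pos (by omega)]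
  · rw [if_neg h, if_neg (by omega)]

-- point update of the binary-selection sum
lemma sumBin_set (M T : List Int) (j v : Int) (h0 : 0 ≤ j) (h1 : j < (M.length : Int))
    (h2 : M.length ≤ T.length) :
    sum_from_bin_list (PySem.List.pySetD T j v) M
      = sum_from_bin_list T M
        - (if PySem.List.pyGetD T j 0 ≠ 0 then PySem.List.pyGetD M j 0 else 0)
        + (if v ≠ 0 then PySem.List.pyGetD M j 0 else 0) := by
  have hjT : j.toNat < T.length := by omega
  have hsplit : PySem.List.pyRange 0 (M.length : Int) 1
      = PySem.List.pyRange 0 j 1 ++ PySem.List.pyRange j (M.length : Int) 1 :=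
    PySem.List.pyRange_one_append 0 j _ h0 (le_of_lt h1)
  have hcons : PySem.List.pyRange j (M.length : Int) 1
      = j :: PySem.List.pyRange (j + 1) (M.length : Int) 1 :=
    PySem.List.pyRange_one_cons h1
  rw [sumBin_eq_sum, sumBin_eq_sum, hsplit, hcons]
  simp only [List.map_append, List.sum_append, List.map_cons, List.sum_cons]
  have hL : (PySem.List.pyRange 0 j 1).map
        (fun i => if PySem.List.pyGetD (PySem.List.pySetD T j v) i 0 ≠ 0 then PySem.List.pyGetD M i 0 else 0)
      = (PySem.List.pyRange 0 j 1).map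
        (fun i => if PySem.List.pyGetD T i 0 ≠ 0 then PySem.List.pyGetD M i 0 else 0) := by
    apply List.map_congr_left
    intro i hi
    have hm := (PySem.List.mem_pyRange_one).mp hi
    rw [pyGetD_set_of_lt T j i v h0 hm.1 hjT, if_neg (show ¬ i = j by omega)]
  have hR : (PySem.List.pyRange (j + 1) (M.length : Int) 1).map
        (fun i => if PySem.List.pyGetD (PySem.List.pySetD T j v) i 0 ≠ 0 then PySem.List.pyGetD M i 0 else 0)
      = (PySem.List.pyRange (j + 1) (M.length : Int) 1).map
        (fun i => if PySem.List.pyGetD T i 0 ≠ 0 then PySem.List.pyGetD M i 0 else 0) := by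
    apply List.map_congr_left
    intro i hi
    have hm := (PySem.List.mem_pyRange_one).mp hi
    rw [pyGetD_set_of_lt T j i v h0 (by omega) hjT, if_neg (show ¬ i = j by omega)]
  rw [hL, hR, pyGetD_set_of_lt T j j v h0 h0 hjT, if_pos rfl]
  ring

-- B's loop from (current selected sum, T) computes exactly A's recursion
lemma loop_eq (M : List Int) (S : Int) :
    ∀ (k : Nat) (index : Int) (T : List Int),
      index + (k : Int) = (M.length : Int) → 0 ≤ index → M.length ≤ T.length →
      ((PySem.List.pyRange index (M.length : Int) 1).foldl (altStep M S)
          (sum_from_bin_list T M, T)).2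
        = subset_sum_recursive M S index T := by
  intro k
  induction k with
  | zero =>
    intro index T hk _ _
    have hidx : index = (M.length : Int) := by omega
    rw [PySem.List.pyRange_one_eq_nil (le_of_eq hidx.symm), List.foldl_nil]
    rw [subset_sum_recursive, if_pos hidx]
  | succ k ih =>
    intro index T hk h0 hT
    have hlt : index < (M.length : Int) := by omega
    have hne : index ≠ (M.length : Int) := by omega
    rw [PySem.List.pyRange_one_cons hlt, List.foldl_cons]
    rw [subset_sum_recursive, if_neg hne, dif_pos hlt]
    set old : Int := if PySem.List.pyGetD T index 0 ≠ 0 then PySem.List.pyGetD M index 0 else 0 with hold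
    have hsum1 : sum_from_bin_list (PySem.List.pySetD T index 1) M
        = sum_from_bin_list T M - old + PySem.List.pyGetD M index 0 := by
      rw [sumBin_set M T index 1 h0 hlt hT, hold]; norm_num
    have hsum0 : sum_from_bin_list (PySem.List.pySetD T index 0) M
        = sum_from_bin_list T M - old := by
      rw [sumBin_set M T index 0 h0 hlt hT, hold]; norm_num
    have hrs : (if PySem.List.pyGetD T index 0 ≠ 0 then
          sum_from_bin_list T M - PySem.List.pyGetD M index 0 else sum_from_bin_list T M)
        = sum_from_bin_list T M - old := by
      rw [hold]; split_ifs <;> ring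
    have hstep : altStep M S (sum_from_bin_list T M, T) index
        = if sum_from_bin_list (PySem.List.pySetD T index 1) M ≤ S then
            (sum_from_bin_list (PySem.List.pySetD T index 1) M, PySem.List.pySetD T index 1)
          else (sum_from_bin_list (PySem.List.pySetD T index 0) M, PySem.List.pySetD T index 0) := by
      simp only [altStep]
      rw [hrs, hsum1, hsum0]
    rw [hstep]
    by_cases hc : sum_from_bin_list (PySem.List.pySetD T index 1) M ≤ S
    · rw [if_pos hc, if_pos hc]
      have hlen1 : M.length ≤ (PySem.List.pySetD T index 1).length := by
        rw [PySem.List.length_pySetD]; exact hT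
      exact ih (index + 1) (PySem.List.pySetD T index 1) (by omega) (by omega) hlen1
    · rw [if_neg hc, if_neg hc]
      have hset2 : PySem.List.pySetD (PySem.List.pySetD T index 1) index 0
          = PySem.List.pySetD T index 0 := by
        rw [PySem.List.pySetD_of_nonneg _ _ h0, PySem.List.pySetD_of_nonneg _ _ h0,
            PySem.List.pySetD_of_nonneg _ _ h0, List.set_set]
      have hlen0 : M.length ≤ (PySem.List.pySetD T index 0).length := by
        rw [PySem.List.length_pySetD]; exact hT
      rw [hset2]
      exact ih (index + 1) (PySem.List.pySetD T index 0) (by omega) (by omega) hlen0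

-- ===== VERDICT (by name: the statement is the Claim_ definition above) =====
theorem subset_sum_recursive_spec : Claim_equal_subset_sum_recursive := by
  intro M S index T _hdom hpre
  unfold Spec_subset_sum_recursive subset_sum_recursive_alt
  rcases hpre with hidx | ⟨h0, hlt, hT⟩
  · rw [subset_sum_recursive, if_pos hidx, if_pos (le_of_eq hidx.symm)]
  · rw [if_neg (by omega)]
    have hk : index + (((M.length : Int) - index).toNat : Int) = (M.length : Int) := by omega
    exact (loop_eq M S ((M.length : Int) - index).toNat index T hk h0 hT).symm
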